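-- pv_equiv track=rewrite | github.com/aryanargupta/HackTheHackerrank | Python/Piling_up.py | myfn
-- ===== SOURCE A (Python) =====
-- def myfn(arr):
--     N = len(arr)
--     for i in range(N//2-1):
--         if arr[i] >= arr[i+1] and arr[N-1-i] >= arr[N-2-i]:
--             pass
--         else:
--             return False
--     return True
-- ===== SOURCE B (Python) =====
-- def myfn(arr):
--     h = len(arr) // 2
--     left = arr[:h]
--     right = arr[-h:] if h else []
--     return left == sorted(left, reverse=True) and right == sorted(right)
-- ===== Notes on version B (the rewrite author's own statement) =====
-- stated objective: simpler
-- what changed: Replaces A's index loop comparing arr[i]/arr[i+1] and arr[N-1-i]/arr[N-2-i] with slicing the two halves and comparing each slice to its sorted version (reverse-sorted left, sorted right).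
import Mathlib
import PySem

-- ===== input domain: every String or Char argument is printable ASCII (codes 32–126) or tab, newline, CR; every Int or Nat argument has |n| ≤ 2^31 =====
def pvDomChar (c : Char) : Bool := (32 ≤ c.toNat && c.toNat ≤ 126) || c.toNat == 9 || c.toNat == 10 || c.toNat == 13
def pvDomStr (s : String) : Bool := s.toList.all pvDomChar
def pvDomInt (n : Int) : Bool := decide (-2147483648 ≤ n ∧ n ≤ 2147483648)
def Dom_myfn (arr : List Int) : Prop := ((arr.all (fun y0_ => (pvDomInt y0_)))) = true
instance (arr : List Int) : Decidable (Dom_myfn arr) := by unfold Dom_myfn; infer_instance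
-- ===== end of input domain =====

-- B replaces A's index-based adjacent-pair loop by comparing each half-slice with its
-- sorted version (simpler, no index arithmetic); equal return value on every input.

-- ===== PORT A =====
-- A: for i in range(N//2-1): if arr[i] >= arr[i+1] and arr[N-1-i] >= arr[N-2-i]: pass else: return False; return True
-- (the early-return-False loop is exactly `all` over the range; every index is in range, so pyGetD's default is never used)
def myfn (arr : List Int) : Bool :=
  let N : Int := PySem.List.len arr
  (PySem.List.pyRange 0 (PySem.Int.floordiv N 2 - 1) 1).all (fun i =>
    decide (PySem.List.pyGetD arr i 0 ≥ PySem.List.pyGetD arr (i + 1) 0) &&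
    decide (PySem.List.pyGetD arr (N - 1 - i) 0 ≥ PySem.List.pyGetD arr (N - 2 - i) 0))

-- ===== PORT B =====
-- B: h = len(arr)//2; left = arr[:h]; right = arr[-h:] if h else []
--    return left == sorted(left, reverse=True) and right == sorted(right)
def myfn_alt (arr : List Int) : Bool :=
  let h : Int := PySem.Int.floordiv (PySem.List.len arr) 2
  let left := PySem.List.slice arr none (some h)
  let right := if h ≠ 0 then PySem.List.slice arr (some (-h)) none else []
  (left == PySem.List.sorted left id true) && (right == PySem.List.sorted right id)

-- ===== PRECONDITION & SPEC =====
def Spec_myfn (arr : List Int) (out : Bool) : Prop := out = myfn_alt arr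
instance (arr : List Int) (out : Bool) : Decidable (Spec_myfn arr out) := by unfold Spec_myfn; infer_instance

-- ===== CLAIM (what is proved, stated in full; the proofs are below) =====
def Claim_equal_myfn : Prop := ∀ (arr : List Int), Dom_myfn arr → Spec_myfn arr (myfn arr)

-- ===== LEMMAS AND PROOFS =====

lemma floordiv_two_cast (n : Nat) :
    PySem.Int.floordiv (n : Int) 2 = ((n / 2 : Nat) : Int) := by
  exact_mod_cast PySem.Int.floordiv_natCast n 2

-- A returns true iff every adjacent pair in the first half is ≥ and, read from the back,
-- every adjacent pair among the last half is ≥ (i.e. the tail is non-decreasing).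
def AdjA (arr : List Int) : Prop :=
  ∀ k : Nat, k + 1 < arr.length / 2 →
    arr.getD (k + 1) 0 ≤ arr.getD k 0 ∧
    arr.getD (arr.length - 2 - k) 0 ≤ arr.getD (arr.length - 1 - k) 0

lemma myfn_iff (arr : List Int) : myfn arr = true ↔ AdjA arr := by
  unfold myfn AdjA
  simp only [PySem.List.len_eq, floordiv_two_cast, List.all_eq_true, Bool.and_eq_true,
    decide_eq_true_eq, ge_iff_le]
  constructor
  · intro H k hk
    have hm : (k : Int) ∈ PySem.List.pyRange 0 (((arr.length / 2 : Nat) : Int) - 1) 1 := by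
      rw [PySem.List.mem_pyRange_one]; constructor <;> omega
    have h2 : ((k : Int) + 1) = ((k + 1 : Nat) : Int) := by push_cast; ring
    have h3 : ((arr.length : Int) - 1 - (k : Int)) = ((arr.length - 1 - k : Nat) : Int) := by
      omega
    have h4 : ((arr.length : Int) - 2 - (k : Int)) = ((arr.length - 2 - k : Nat) : Int) := by
      omega
    have := H (k : Int) hm
    rw [h2, h3, h4] at this
    simp only [PySem.List.pyGetD_natCast] at this
    exact this
  · intro H i hi
    rw [PySem.List.mem_pyRange_one] at hi
    obtain ⟨h0, h1⟩ := hi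
    lift i to Nat using h0 with k
    have hk : k + 1 < arr.length / 2 := by omega
    have h2 : ((k : Int) + 1) = ((k + 1 : Nat) : Int) := by push_cast; ring
    have h3 : ((arr.length : Int) - 1 - (k : Int)) = ((arr.length - 1 - k : Nat) : Int) := by
      omega
    have h4 : ((arr.length : Int) - 2 - (k : Int)) = ((arr.length - 2 - k : Nat) : Int) := by
      omega
    rw [h2, h3, h4]
    simp only [PySem.List.pyGetD_natCast]
    exact H k hk

lemma eq_sorted_rev_iff (l : List Int) :
    l = PySem.List.sorted l id true ↔ l.Pairwise (fun a b => b ≤ a) := by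
  constructor
  · intro h
    rw [h]
    simpa using PySem.List.sorted_pairwise_rev l id
  · intro h
    exact (PySem.List.sorted_rev_eq_self_of_pairwise l id (by simpa using h)).symm

lemma eq_sorted_iff (l : List Int) :
    l = PySem.List.sorted l id ↔ l.Pairwise (fun a b => a ≤ b) := by
  constructor
  · intro h
    rw [h]
    simpa using PySem.List.sorted_pairwise l id
  · intro h
    exact (PySem.List.sorted_eq_self_of_pairwise l id (by simpa using h)).symm

lemma myfn_alt_iff (arr : List Int) :
    myfn_alt arr = true ↔
      (arr.take (arr.length / 2)).Pairwise (fun a b => b ≤ a) ∧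
      (arr.drop (arr.length - arr.length / 2)).Pairwise (fun a b => a ≤ b) := by
  unfold myfn_alt
  simp only [PySem.List.len_eq, floordiv_two_cast]
  by_cases hz : arr.length / 2 = 0
  · have hn : arr.length ≤ 1 := by omega
    rw [hz]
    simp only [Nat.cast_zero, ne_eq, not_true_eq_false, if_false, neg_zero]
    have hl : PySem.List.slice arr none (some (0 : Int)) = arr.take 0 := by
      simpa using PySem.List.slice_to_natCast arr 0
    have hr : arr.drop (arr.length - 0) = ([] : List Int) := by
      simp [List.drop_of_length_le]
    rw [hl, hr]
    simp
    exact ⟨rfl, rfl⟩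
  · have hpos : 0 < arr.length / 2 := Nat.pos_of_ne_zero hz
    have hne : ((arr.length / 2 : Nat) : Int) ≠ 0 := by exact_mod_cast hz
    rw [if_pos hne]
    rw [PySem.List.slice_to_natCast arr (arr.length / 2),
        PySem.List.slice_from_neg_natCast arr (arr.length / 2) hpos]
    simp only [Bool.and_eq_true, beq_iff_eq]
    rw [eq_sorted_rev_iff, eq_sorted_iff]

lemma pairwise_take_iff (arr : List Int) :
    (arr.take (arr.length / 2)).Pairwise (fun a b => b ≤ a) ↔
      ∀ k : Nat, k + 1 < arr.length / 2 → arr.getD (k + 1) 0 ≤ arr.getD k 0 := by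
  rw [← List.isChain_iff_pairwise, List.isChain_iff_getElem]
  have hlen : (arr.take (arr.length / 2)).length = arr.length / 2 := by
    simp [Nat.div_le_self]
  constructor
  · intro H k hk
    have hk' : k + 1 < (arr.take (arr.length / 2)).length := by omega
    have := H k hk'
    rw [List.getElem_take, List.getElem_take] at this
    rw [List.getD_eq_getElem _ _ (by omega), List.getD_eq_getElem _ _ (by omega)]
    exact this
  · intro H k hk
    rw [List.getElem_take, List.getElem_take]
    have := H k (by omega)
    rw [List.getD_eq_getElem _ _ (by omega), List.getD_eq_getElem _ _ (by omega)] at this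
    exact this

lemma pairwise_drop_iff (arr : List Int) :
    (arr.drop (arr.length - arr.length / 2)).Pairwise (fun a b => a ≤ b) ↔
      ∀ k : Nat, k + 1 < arr.length / 2 →
        arr.getD (arr.length - arr.length / 2 + k) 0 ≤
          arr.getD (arr.length - arr.length / 2 + k + 1) 0 := by
  rw [← List.isChain_iff_pairwise, List.isChain_iff_getElem]
  have hd : arr.length / 2 ≤ arr.length := Nat.div_le_self _ _
  have hlen : (arr.drop (arr.length - arr.length / 2)).length = arr.length / 2 := by
    simp; omega
  constructor
  · intro H k hk
    have := H k (by omega)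
    rw [List.getElem_drop, List.getElem_drop] at this
    rw [List.getD_eq_getElem _ _ (by omega), List.getD_eq_getElem _ _ (by omega)]
    convert this using 2
  · intro H k hk
    rw [List.getElem_drop, List.getElem_drop]
    have := H k (by omega)
    rw [List.getD_eq_getElem _ _ (by omega), List.getD_eq_getElem _ _ (by omega)] at this
    convert this using 2

lemma ports_agree (arr : List Int) : myfn arr = myfn_alt arr := by
  rw [Bool.eq_iff_iff, myfn_iff, myfn_alt_iff, pairwise_take_iff, pairwise_drop_iff]
  unfold AdjA
  have hd : arr.length / 2 ≤ arr.length := Nat.div_le_self _ _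
  constructor
  · intro H
    refine ⟨fun k hk => (H k hk).1, fun k hk => ?_⟩
    have := (H (arr.length / 2 - 2 - k) (by omega)).2
    have e1 : arr.length - 2 - (arr.length / 2 - 2 - k) = arr.length - arr.length / 2 + k := by
      omega
    have e2 : arr.length - 1 - (arr.length / 2 - 2 - k) =
        arr.length - arr.length / 2 + k + 1 := by omega
    rwa [e1, e2] at this
  · intro ⟨H1, H2⟩ k hk
    refine ⟨H1 k hk, ?_⟩
    have := H2 (arr.length / 2 - 2 - k) (by omega)
    have e2 : arr.length - arr.length / 2 + (arr.length / 2 - 2 - k) + 1 =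
        arr.length - 1 - k := by omega
    have e1 : arr.length - arr.length / 2 + (arr.length / 2 - 2 - k) = arr.length - 2 - k := by
      omega
    rwa [e2, e1] at this

-- ===== VERDICT (by name: the statement is the Claim_ definition above) =====
theorem myfn_spec : Claim_equal_myfn := by
  intro arr _
  unfold Spec_myfn
  exact ports_agree arr
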